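-- pv_equiv track=rewrite | github.com/Pranshugoyal/algo-ds-practice | python/Greedy.py | candyStore
-- ===== SOURCE A (Python) =====
-- def candyStore(candies,N,K):
-- 	candies.sort()
--
-- 	totalCandyTypes = 0
-- 	i = 0
-- 	minMoneySpent = 0
-- 	while totalCandyTypes < N:
-- 		totalCandyTypes += K + 1
-- 		minMoneySpent += candies[i]
-- 		i += 1
--
-- 	totalCandyTypes = 0
-- 	i = 0
-- 	maxMoneySpent = 0
-- 	while totalCandyTypes < N:
-- 		totalCandyTypes += K + 1
-- 		maxMoneySpent += candies[-i-1]
-- 		i += 1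
--
-- 	return [minMoneySpent, maxMoneySpent]
-- ===== SOURCE B (Python) =====
-- def candyStore(candies, N, K):
--     # Sorts candies in place, like the original.
--     if N <= 0:
--         return [0, 0]
--     candies.sort()
--     m = (N + K) // (K + 1)          # ceil(N/(K+1)), closed form
--     return [sum(candies[:m]), sum(candies[-m:])]
-- ===== Notes on version B (the rewrite author's own statement) =====
-- stated objective: simpler
-- what changed: Replaces A's two counter-driven while loops (incrementing a running totalCandyTypes by K+1 and indexing one element per step) by the closed form m = ceil(N/(K+1)) and two slice sums over the sorted list.
import Mathlib
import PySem

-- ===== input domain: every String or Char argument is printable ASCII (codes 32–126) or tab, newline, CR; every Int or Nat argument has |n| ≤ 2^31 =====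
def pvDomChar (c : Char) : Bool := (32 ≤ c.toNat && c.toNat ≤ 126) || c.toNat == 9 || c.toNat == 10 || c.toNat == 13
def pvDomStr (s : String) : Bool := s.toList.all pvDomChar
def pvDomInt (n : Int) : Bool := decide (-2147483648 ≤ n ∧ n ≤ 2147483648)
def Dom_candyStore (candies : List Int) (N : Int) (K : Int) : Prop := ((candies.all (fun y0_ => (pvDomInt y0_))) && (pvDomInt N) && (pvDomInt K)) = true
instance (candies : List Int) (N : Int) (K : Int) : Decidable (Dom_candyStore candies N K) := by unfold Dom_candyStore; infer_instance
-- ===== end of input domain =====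

-- B replaces A's two counter-driven while loops by the closed form m = ceil(N/(K+1)) and two slice
-- sums over the sorted list (objective: simpler). Both A and B sort the argument list in place in
-- Python; the equivalence proved here is about the return value.

-- ===== PORT A =====
-- first while loop: sums candies[i] while totalCandyTypes < N; fuel = length+1 suffices because
-- i increases every step and candies[i] raises (pyGet? = none) once i = length.
def pvMinLoop (s : List Int) (N K : Int) : Nat → Int → Int → Int → Option Int
  | 0, _, _, _ => none
  | fuel+1, total, i, acc =>
    if total < N then
      match PySem.List.pyGet? s i with
      | none => none
      | some v => pvMinLoop s N K fuel (total + (K+1)) (i+1) (acc + v)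
    else some acc

-- second while loop: identical except it reads candies[-i-1]
def pvMaxLoop (s : List Int) (N K : Int) : Nat → Int → Int → Int → Option Int
  | 0, _, _, _ => none
  | fuel+1, total, i, acc =>
    if total < N then
      match PySem.List.pyGet? s (-i-1) with
      | none => none
      | some v => pvMaxLoop s N K fuel (total + (K+1)) (i+1) (acc + v)
    else some acc

def candyStore (candies : List Int) (N : Int) (K : Int) : List Int :=
  let s := PySem.List.sorted candies (fun x => x) false
  [(pvMinLoop s N K (s.length + 1) 0 0 0).getD 0,
   (pvMaxLoop s N K (s.length + 1) 0 0 0).getD 0]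

-- ===== PORT B =====
def candyStore_alt (candies : List Int) (N : Int) (K : Int) : List Int :=
  if N ≤ 0 then [0, 0]
  else
    let s := PySem.List.sorted candies (fun x => x) false
    let m := PySem.Int.floordiv (N + K) (K + 1)
    [(PySem.List.slice s none (some m)).sum,
     (PySem.List.slice s (some (-m)) none).sum]

-- ===== PRECONDITION & SPEC =====
-- Exactly the inputs where A returns: the loops never run (N ≤ 0), or each loop runs
-- ceil(N/(K+1)) steps — this requires K+1 > 0 (else the counter never reaches N and the index
-- runs off the list: IndexError) and ceil(N/(K+1)) ≤ len(candies) (else IndexError).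
def Pre_candyStore (candies : List Int) (N : Int) (K : Int) : Prop :=
  N ≤ 0 ∨ (0 ≤ K ∧ PySem.Int.floordiv (N + K) (K + 1) ≤ (candies.length : Int))
instance (candies : List Int) (N : Int) (K : Int) : Decidable (Pre_candyStore candies N K) := by unfold Pre_candyStore; infer_instance
def pvWitness_candyStore : List Int × Int × Int := ([3, 1, 2, 5], 4, 1)

def Spec_candyStore (candies : List Int) (N : Int) (K : Int) (out : List Int) : Prop := out = candyStore_alt candies N K
instance (candies : List Int) (N : Int) (K : Int) (out : List Int) : Decidable (Spec_candyStore candies N K out) := by unfold Spec_candyStore; infer_instance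

-- ===== CLAIM (what is proved, stated in full; the proofs are below) =====
def Claim_equal_candyStore : Prop := ∀ (candies : List Int) (N : Int) (K : Int), Dom_candyStore candies N K → Pre_candyStore candies N K → Spec_candyStore candies N K (candyStore candies N K)

-- ===== LEMMAS AND PROOFS =====

theorem pvMinLoop_eq (s : List Int) (N K : Int)
    (t : Nat) : ∀ (fuel : Nat) (total i acc : Int), t < fuel → 0 ≤ i →
    i.toNat + t ≤ s.length →
    N ≤ total + (t : Int) * (K + 1) →
    (∀ j : Nat, j < t → total + (j : Int) * (K + 1) < N) →
    pvMinLoop s N K fuel total i acc = some (acc + ((s.drop i.toNat).take t).sum) := by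
  induction t with
  | zero =>
    intro fuel total i acc hf hi hlen hN _
    obtain ⟨f, rfl⟩ : ∃ f, fuel = f + 1 := ⟨fuel - 1, by omega⟩
    simp only [pvMinLoop]
    rw [if_neg (by simp at hN; omega)]
    simp
  | succ t ih =>
    intro fuel total i acc hf hi hlen hN hlt
    obtain ⟨f, rfl⟩ : ∃ f, fuel = f + 1 := ⟨fuel - 1, by omega⟩
    have htl : total < N := by have := hlt 0 (by omega); simpa using this
    have hil : i.toNat < s.length := by omega
    have hget : PySem.List.pyGet? s i = some s[i.toNat] :=
      PySem.List.pyGet?_eq_some_getElem s hi (by omega)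
    have step := ih f (total + (K + 1)) (i + 1) (acc + s[i.toNat])
      (by omega) (by omega) (by omega)
      (by
        have hexp : ((t : Int) + 1) * (K + 1) = (t : Int) * (K + 1) + (K + 1) := by ring
        push_cast at hN
        linarith)
      (by
        intro j hj
        have h := hlt (j + 1) (by omega)
        have hj1 : ((j : Int) + 1) * (K + 1) = (j : Int) * (K + 1) + (K + 1) := by ring
        push_cast at h
        linarith)
    simp only [pvMinLoop, if_pos htl, hget]
    rw [step]
    have h1 : (i + 1).toNat = i.toNat + 1 := by omega
    rw [h1, List.drop_eq_getElem_cons hil, List.take_succ_cons, List.sum_cons, add_assoc]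

theorem pvMaxLoop_eq (s : List Int) (N K : Int)
    (t : Nat) : ∀ (fuel : Nat) (total i acc : Int), t < fuel → 0 ≤ i →
    i.toNat + t ≤ s.length →
    N ≤ total + (t : Int) * (K + 1) →
    (∀ j : Nat, j < t → total + (j : Int) * (K + 1) < N) →
    pvMaxLoop s N K fuel total i acc = some (acc + ((s.reverse.drop i.toNat).take t).sum) := by
  induction t with
  | zero =>
    intro fuel total i acc hf hi hlen hN _
    obtain ⟨f, rfl⟩ : ∃ f, fuel = f + 1 := ⟨fuel - 1, by omega⟩
    simp only [pvMaxLoop]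
    rw [if_neg (by simp at hN; omega)]
    simp
  | succ t ih =>
    intro fuel total i acc hf hi hlen hN hlt
    obtain ⟨f, rfl⟩ : ∃ f, fuel = f + 1 := ⟨fuel - 1, by omega⟩
    have htl : total < N := by have := hlt 0 (by omega); simpa using this
    have hil : i.toNat < s.length := by omega
    have hrevlen : i.toNat < s.reverse.length := by rw [List.length_reverse]; omega
    have hneg : -i - 1 = -((i.toNat + 1 : Nat) : Int) := by omega
    have hget : PySem.List.pyGet? s (-i - 1) = some s.reverse[i.toNat] := by
      rw [hneg, PySem.List.pyGet?_neg_natCast s (i.toNat + 1) (by omega) (by omega)]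
      rw [List.getElem?_eq_getElem (by omega)]
      congr 1
      rw [List.getElem_reverse]
      congr 1
      omega
    have step := ih f (total + (K + 1)) (i + 1) (acc + s.reverse[i.toNat])
      (by omega) (by omega) (by omega)
      (by
        have hexp : ((t : Int) + 1) * (K + 1) = (t : Int) * (K + 1) + (K + 1) := by ring
        push_cast at hN
        linarith)
      (by
        intro j hj
        have h := hlt (j + 1) (by omega)
        have hj1 : ((j : Int) + 1) * (K + 1) = (j : Int) * (K + 1) + (K + 1) := by ring
        push_cast at h
        linarith)
    simp only [pvMaxLoop, if_pos htl, hget]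
    rw [step]
    have h1 : (i + 1).toNat = i.toNat + 1 := by omega
    rw [h1, List.drop_eq_getElem_cons hrevlen, List.take_succ_cons, List.sum_cons, add_assoc]

-- the positive case of the claim, for an arbitrary (sorted) list s
theorem candyStore_pos (s : List Int) (N K : Int) (hN : 0 < N) (hK : 0 ≤ K)
    (hm : PySem.Int.floordiv (N + K) (K + 1) ≤ (s.length : Int)) :
    [(pvMinLoop s N K (s.length + 1) 0 0 0).getD 0,
     (pvMaxLoop s N K (s.length + 1) 0 0 0).getD 0] =
    [(PySem.List.slice s none (some (PySem.Int.floordiv (N + K) (K + 1)))).sum,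
     (PySem.List.slice s (some (-(PySem.Int.floordiv (N + K) (K + 1)))) none).sum] := by
  have hpos : (0 : Int) < K + 1 := by omega
  set m := PySem.Int.floordiv (N + K) (K + 1) with hmdef
  have hmspec : m * (K + 1) ≤ N + K ∧ N + K < (m + 1) * (K + 1) :=
    (PySem.Int.floordiv_eq_iff_of_pos hpos).mp rfl
  have hexp : (m + 1) * (K + 1) = m * (K + 1) + (K + 1) := by ring
  have hm1 : 1 ≤ m := by nlinarith [hmspec.2]
  have hcast : ((m.toNat : Nat) : Int) = m := by omega
  have hNle : N ≤ (0 : Int) + (m.toNat : Int) * (K + 1) := by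
    rw [hcast]; linarith [hmspec.2]
  have hlt : ∀ j : Nat, j < m.toNat → (0 : Int) + (j : Int) * (K + 1) < N := by
    intro j hj
    have hjm : (j : Int) ≤ m - 1 := by omega
    nlinarith [hmspec.1, mul_nonneg (show (0 : Int) ≤ m - 1 - j by omega)
      (show (0 : Int) ≤ K + 1 by omega)]
  rw [pvMinLoop_eq s N K m.toNat (s.length + 1) 0 0 0 (by omega) le_rfl (by omega) hNle hlt,
      pvMaxLoop_eq s N K m.toNat (s.length + 1) 0 0 0 (by omega) le_rfl (by omega) hNle hlt]
  rw [PySem.List.slice_to s (by omega),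
      show -m = -((m.toNat : Nat) : Int) by omega,
      PySem.List.slice_from_neg_natCast s m.toNat (by omega)]
  simp [List.take_reverse, List.sum_reverse]

-- ===== VERDICT (by name: the statement is the Claim_ definition above) =====
theorem candyStore_spec : Claim_equal_candyStore := by
  intro candies N K _ hpre
  unfold Spec_candyStore candyStore candyStore_alt
  by_cases hN : N ≤ 0
  · rw [if_pos hN]
    simp only [pvMinLoop, pvMaxLoop]
    rw [if_neg (by omega), if_neg (by omega)]
    rfl
  · rcases hpre with h | ⟨hK, hm⟩
    · omega
    rw [if_neg hN]
    have hlen : (PySem.List.sorted candies (fun x => x) false).length = candies.length :=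
      PySem.List.length_sorted candies (fun x => x) false
    exact candyStore_pos (PySem.List.sorted candies (fun x => x) false) N K
      (by omega) hK (by rw [hlen]; exact hm)
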